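-- pv_equiv track=rewrite | github.com/StoyanStoyanov1/Python-Fundamental | second_way/list_advanced/more_exercises/take_or_skip_rope.py | take_or_skip
-- ===== SOURCE A (Python) =====
-- def take_or_skip(text):
--     numbers_list = [digit for digit in text if digit.isdigit()]
--     non_numbers = [symbol for symbol in text if not symbol.isdigit()]
--     result = []
--
--     for index, digit in enumerate(numbers_list):
--         if index % 2 == 0:
--             if int(digit) != 0:
--                 for _ in range(int(digit)):
--                     if len(non_numbers) == 0:
--                         break
--                     result.append(non_numbers.pop(0))
--
--         else:
--             if int(digit) != 0:
--                 for _ in range(int(digit)):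
--                     if len(non_numbers) == 0:
--                         break
--                     non_numbers.pop(0)
--
--     return "".join(result)
-- ===== SOURCE B (Python) =====
-- def take_or_skip(text):
--     numbers_list = [c for c in text if c.isdigit()]
--     non_numbers = [c for c in text if not c.isdigit()]
--     out = []
--     pos = 0
--     for index, digit in enumerate(numbers_list):
--         n = int(digit)
--         if index % 2 == 0:
--             out.append(''.join(non_numbers[pos:pos + n]))
--         pos += n
--     return ''.join(out)
-- ===== Notes on version B (the rewrite author's own statement) =====
-- stated objective: simpler
-- what changed: The destructive inner range/pop(0)/break loops are replaced by an advancing position pointer with one clamped slice per even-indexed digit, so non_numbers is never mutated.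
import Mathlib
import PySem

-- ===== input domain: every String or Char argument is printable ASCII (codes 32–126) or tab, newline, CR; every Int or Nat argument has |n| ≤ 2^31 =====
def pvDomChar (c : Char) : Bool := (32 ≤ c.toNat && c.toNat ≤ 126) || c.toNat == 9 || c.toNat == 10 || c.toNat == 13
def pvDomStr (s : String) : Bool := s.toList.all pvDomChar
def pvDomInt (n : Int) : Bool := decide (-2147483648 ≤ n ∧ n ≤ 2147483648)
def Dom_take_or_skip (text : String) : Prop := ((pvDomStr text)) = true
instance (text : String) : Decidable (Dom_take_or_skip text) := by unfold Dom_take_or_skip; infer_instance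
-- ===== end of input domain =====

-- B replaces A's destructive pop(0)/break inner loops by a position pointer with one
-- clamped slice per digit (objective: simpler; no mutation of non_numbers).

-- ===== PORT A =====
-- int(digit) for a single char that passed isdigit (ASCII): its value is c.toNat - 48 (exact on Dom).
def pvDigitVal (c : Char) : Nat := c.toNat - 48

-- inner loop of the even branch: range(int(digit)) popping non_numbers[0] into result, break on empty
def pvPopTake : Nat → List Char → List Char → List Char × List Char
  | 0, ns, res => (ns, res)
  | _ + 1, [], res => ([], res)
  | k + 1, c :: ns, res => pvPopTake k ns (res ++ [c])

-- inner loop of the odd branch: range(int(digit)) popping non_numbers[0] and discarding, break on empty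
def pvPopSkip : Nat → List Char → List Char
  | 0, ns => ns
  | _ + 1, [] => []
  | k + 1, _ :: ns => pvPopSkip k ns

-- the outer 'for index, digit in enumerate(numbers_list)' loop, state = (non_numbers, result)
def pvLoopA : List Char → Nat → List Char → List Char → List Char
  | [], _, _, res => res
  | d :: ds, i, ns, res =>
    if i % 2 == 0 then
      if pvDigitVal d ≠ 0 then
        let p := pvPopTake (pvDigitVal d) ns res
        pvLoopA ds (i + 1) p.1 p.2
      else pvLoopA ds (i + 1) ns res
    else
      if pvDigitVal d ≠ 0 then pvLoopA ds (i + 1) (pvPopSkip (pvDigitVal d) ns) res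
      else pvLoopA ds (i + 1) ns res

def take_or_skip (text : String) : String :=
  let numbers_list := text.toList.filter (fun c => PySem.Chars.isdigit c)
  let non_numbers := text.toList.filter (fun c => !PySem.Chars.isdigit c)
  String.ofList (pvLoopA numbers_list 0 non_numbers [])

-- ===== PORT B =====
-- Source B's loop: pos pointer, chunk = non_numbers[pos:pos+n] appended on even index, pos += n always
def pvLoopB : List Char → Nat → Nat → List Char → List (List Char)
  | [], _, _, _ => []
  | d :: ds, i, pos, rest =>
    let n := pvDigitVal d
    if i % 2 == 0 then
      PySem.List.slice rest (some (pos : Int)) (some ((pos : Int) + (n : Int))) ::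
        pvLoopB ds (i + 1) (pos + n) rest
    else pvLoopB ds (i + 1) (pos + n) rest

def take_or_skip_alt (text : String) : String :=
  let numbers_list := text.toList.filter (fun c => PySem.Chars.isdigit c)
  let non_numbers := text.toList.filter (fun c => !PySem.Chars.isdigit c)
  String.ofList ((pvLoopB numbers_list 0 0 non_numbers).flatten)

-- ===== PRECONDITION & SPEC =====
def Spec_take_or_skip (text : String) (out : String) : Prop := out = take_or_skip_alt text
instance (text : String) (out : String) : Decidable (Spec_take_or_skip text out) := by unfold Spec_take_or_skip; infer_instance

-- ===== CLAIM (what is proved, stated in full; the proofs are below) =====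
def Claim_equal_take_or_skip : Prop := ∀ (text : String), Dom_take_or_skip text → Spec_take_or_skip text (take_or_skip text)

-- ===== LEMMAS AND PROOFS =====

theorem pvPopTake_eq (n : Nat) : ∀ (ns res : List Char),
    pvPopTake n ns res = (ns.drop n, res ++ ns.take n) := by
  induction n with
  | zero => intro ns res; simp [pvPopTake]
  | succ k ih =>
    intro ns res
    cases ns with
    | nil => simp [pvPopTake]
    | cons c ns => simp [pvPopTake, ih]

theorem pvPopSkip_eq (n : Nat) : ∀ (ns : List Char), pvPopSkip n ns = ns.drop n := by
  induction n with
  | zero => intro ns; simp [pvPopSkip]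
  | succ k ih =>
    intro ns
    cases ns with
    | nil => simp [pvPopSkip]
    | cons c ns => simp [pvPopSkip, ih]

theorem pvLoop_eq (ds : List Char) : ∀ (i pos : Nat) (res : List Char) (L : List Char),
    pvLoopA ds i (L.drop pos) res = res ++ (pvLoopB ds i pos L).flatten := by
  induction ds with
  | nil => intro i pos res L; simp [pvLoopA, pvLoopB]
  | cons d ds ih =>
    intro i pos res L
    have hdd : (L.drop pos).drop (pvDigitVal d) = L.drop (pos + pvDigitVal d) := by
      rw [List.drop_drop]
    by_cases hi : i % 2 == 0
    · by_cases hd : pvDigitVal d ≠ 0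
      · simp only [pvLoopA, pvLoopB, hi, if_true, if_pos hd]
        rw [pvPopTake_eq, PySem.List.slice_natCast_add]
        simp only [hdd, ih (i + 1) (pos + pvDigitVal d), List.flatten_cons, List.append_assoc]
      · rw [not_ne_iff] at hd
        simp only [pvLoopA, pvLoopB, hi, if_true, if_neg (by simp [hd] : ¬ pvDigitVal d ≠ 0)]
        rw [PySem.List.slice_natCast_add, hd]
        simpa using ih (i + 1) pos res L
    · by_cases hd : pvDigitVal d ≠ 0
      · simp only [pvLoopA, pvLoopB, hi, if_pos hd]
        rw [pvPopSkip_eq, hdd]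
        exact ih (i + 1) (pos + pvDigitVal d) res L
      · rw [not_ne_iff] at hd
        simp only [pvLoopA, pvLoopB, hi, if_neg (by simp [hd] : ¬ pvDigitVal d ≠ 0)]
        rw [hd]
        simpa using ih (i + 1) pos res L

-- ===== VERDICT (by name: the statement is the Claim_ definition above) =====
theorem take_or_skip_spec : Claim_equal_take_or_skip := by
  intro text _
  unfold Spec_take_or_skip take_or_skip take_or_skip_alt
  have h := pvLoop_eq (text.toList.filter (fun c => PySem.Chars.isdigit c)) 0 0 []
      (text.toList.filter (fun c => !PySem.Chars.isdigit c))
  simpa using congrArg String.ofList h
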